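-- pv_equiv track=rewrite | github.com/gksl5355/remon | app/ai_pipeline/preprocess/table_detector.py | _remove_table_lines
-- ===== SOURCE A (Python) =====
-- from typing import List, Dict, Tuple, Optional, Any
--
-- def _remove_table_lines(lines: List[str], table_regions: List[Tuple[int, int]]) -> List[str]:
--     """테이블 영역을 텍스트에서 제거."""
--     if not table_regions:
--         return lines
--
--     # 테이블 라인 인덱스 수집
--     table_line_indices = set()
--     for start, end in table_regions:
--         for idx in range(start, end + 1):
--             table_line_indices.add(idx)
--
--     # 테이블이 아닌 라인만 반환
--     non_table_lines = [
--         line for idx, line in enumerate(lines)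
--         if idx not in table_line_indices
--     ]
--
--     return non_table_lines
-- ===== SOURCE B (Python) =====
-- from typing import List, Tuple
--
-- def _remove_table_lines(lines: List[str], table_regions: List[Tuple[int, int]]) -> List[str]:
--     """Filter lines directly: keep a line unless some region covers its index."""
--     if not table_regions:
--         return lines
--     return [
--         line for idx, line in enumerate(lines)
--         if not any(start <= idx <= end for start, end in table_regions)
--     ]
-- ===== Notes on version B (the rewrite author's own statement) =====
-- stated objective: simpler
-- what changed: Dropped the precomputed index-set pass (materialising every index of every range) in favour of a single comprehension that tests each line index directly against the region bounds.
import Mathlib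
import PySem

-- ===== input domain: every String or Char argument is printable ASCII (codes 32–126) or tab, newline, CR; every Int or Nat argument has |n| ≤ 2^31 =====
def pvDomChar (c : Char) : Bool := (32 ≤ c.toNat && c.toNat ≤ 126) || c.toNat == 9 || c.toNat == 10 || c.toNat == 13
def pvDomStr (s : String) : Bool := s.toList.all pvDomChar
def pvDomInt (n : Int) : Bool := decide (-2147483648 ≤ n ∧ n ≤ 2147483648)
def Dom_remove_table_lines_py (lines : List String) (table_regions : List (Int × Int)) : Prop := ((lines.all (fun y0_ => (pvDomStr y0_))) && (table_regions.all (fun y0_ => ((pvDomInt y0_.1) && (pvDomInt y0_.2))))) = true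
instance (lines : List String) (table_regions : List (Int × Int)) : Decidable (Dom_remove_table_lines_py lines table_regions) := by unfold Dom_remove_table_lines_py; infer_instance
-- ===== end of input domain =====

-- B replaces A's materialised index set (one entry per covered index) with a direct
-- per-line scan of the region bounds; objective: simpler.

-- ===== PORT A =====
-- literal transliteration: build the set of all table line indices, then keep lines whose
-- index is not in it.  Python's hash set is ported as Std.HashSet: the set is consumed only
-- by membership tests (never iterated), so the port is exact and stays evaluable on wide ranges.
def remove_table_lines_py (lines : List String) (table_regions : List (Int × Int)) : List String :=
  if table_regions = [] then lines
  else
    let table_line_indices : Std.HashSet Int :=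
      table_regions.foldl
        (fun s r => (PySem.List.pyRange r.1 (r.2 + 1) 1).foldl (fun s' idx => s'.insert idx) s)
        ∅
    ((PySem.List.enumerate lines 0).filter (fun p => !(table_line_indices.contains p.1))).map (·.2)

-- ===== PORT B =====
-- literal transliteration of Source B: keep a line unless some region covers its index
def remove_table_lines_py_alt (lines : List String) (table_regions : List (Int × Int)) : List String :=
  if table_regions = [] then lines
  else
    ((PySem.List.enumerate lines 0).filter
      (fun p => !(table_regions.any (fun r => decide (r.1 ≤ p.1) && decide (p.1 ≤ r.2))))).map (·.2)

-- ===== PRECONDITION & SPEC =====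
def Spec_remove_table_lines_py (lines : List String) (table_regions : List (Int × Int)) (out : List String) : Prop := out = remove_table_lines_py_alt lines table_regions
instance (lines : List String) (table_regions : List (Int × Int)) (out : List String) : Decidable (Spec_remove_table_lines_py lines table_regions out) := by unfold Spec_remove_table_lines_py; infer_instance

-- ===== CLAIM (what is proved, stated in full; the proofs are below) =====
def Claim_equal_remove_table_lines_py : Prop := ∀ (lines : List String) (table_regions : List (Int × Int)), Dom_remove_table_lines_py lines table_regions → Spec_remove_table_lines_py lines table_regions (remove_table_lines_py lines table_regions)

-- ===== LEMMAS AND PROOFS =====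

theorem contains_foldl_insert (l : List Int) (s : Std.HashSet Int) (x : Int) :
    (l.foldl (fun s' idx => s'.insert idx) s).contains x = true ↔ s.contains x = true ∨ x ∈ l := by
  induction l generalizing s with
  | nil => simp
  | cons a t ih =>
    simp only [List.foldl_cons, ih, Std.HashSet.contains_insert, List.mem_cons, beq_iff_eq,
      Bool.or_eq_true]
    tauto

theorem mem_indices (table_regions : List (Int × Int)) (s : Std.HashSet Int) (x : Int) :
    (table_regions.foldl
        (fun s r => (PySem.List.pyRange r.1 (r.2 + 1) 1).foldl (fun s' idx => s'.insert idx) s) s).contains x = true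
      ↔ s.contains x = true ∨ ∃ r ∈ table_regions, r.1 ≤ x ∧ x ≤ r.2 := by
  induction table_regions generalizing s with
  | nil => simp
  | cons a t ih =>
    simp only [List.foldl_cons, ih, contains_foldl_insert, PySem.List.mem_pyRange_one]
    constructor
    · rintro (((h | ⟨h1, h2⟩) | ⟨r, hr, h3⟩))
      · exact Or.inl h
      · exact Or.inr ⟨a, List.mem_cons_self, h1, by omega⟩
      · exact Or.inr ⟨r, List.mem_cons_of_mem _ hr, h3⟩
    · rintro (h | ⟨r, hr, h1, h2⟩)
      · exact Or.inl (Or.inl h)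
      · rcases List.mem_cons.mp hr with rfl | hr
        · exact Or.inl (Or.inr ⟨h1, by omega⟩)
        · exact Or.inr ⟨r, hr, h1, h2⟩

-- ===== VERDICT (by name: the statement is the Claim_ definition above) =====
theorem remove_table_lines_py_spec : Claim_equal_remove_table_lines_py := by
  intro lines table_regions _
  unfold Spec_remove_table_lines_py remove_table_lines_py remove_table_lines_py_alt
  by_cases h : table_regions = []
  · simp [h]
  · simp only [h, ite_false]
    congr 1
    apply List.filter_congr
    intro p _
    rw [Bool.eq_iff_iff]
    simp only [Bool.not_eq_true']
    rw [← not_iff_not]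
    simp only [Bool.not_eq_false, List.any_eq_true, Bool.and_eq_true, decide_eq_true_eq]
    rw [mem_indices]
    simp
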